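-- pv_equiv track=rewrite | github.com/achicha/py_samples | codeforces/158A.py | next_round
-- ===== SOURCE A (Python) =====
-- def next_round(n, k, a_lst):
--     """
--     8 5
--     10 9 8 7 7 7 5 5
--     """
--     wnrs = sorted([int(i) for i in a_lst if int(i) > 0], reverse=True)
--     # if no winners
--     if not len(wnrs):
--         return 0
--
--     # if all of them are winners
--     if len(wnrs) <= k:
--         return len(wnrs)
--
--     # if someone has the same result, keep him in the winners and exclude others.
--     current_k = k - 1
--     next_k = 0
--     while True:
--         next_k += 1
--         if current_k + next_k <= len(wnrs) - 1 and wnrs[current_k] == wnrs[current_k + next_k]: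
--             continue
--         else:
--             return len(wnrs[:k + next_k - 1])
-- ===== SOURCE B (Python) =====
-- def next_round(n, k, a_lst):
--     scores = sorted((int(i) for i in a_lst if int(i) > 0), reverse=True)
--     if not scores or len(scores) <= k:
--         return len(scores)
--     threshold = scores[k - 1]
--     return sum(1 for s in scores if s >= threshold)
-- ===== Notes on version B (the rewrite author's own statement) =====
-- stated objective: simpler
-- what changed: B replaces A's tie-walking while-loop (incrementing past the k-th index while neighbours are equal) by computing the k-th place threshold once and counting all scores >= it in one comprehension.
-- outside the precondition, e.g. on next_round(3, 0, [3, 2, 1]): A returns 0, B returns 3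
import Mathlib
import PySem

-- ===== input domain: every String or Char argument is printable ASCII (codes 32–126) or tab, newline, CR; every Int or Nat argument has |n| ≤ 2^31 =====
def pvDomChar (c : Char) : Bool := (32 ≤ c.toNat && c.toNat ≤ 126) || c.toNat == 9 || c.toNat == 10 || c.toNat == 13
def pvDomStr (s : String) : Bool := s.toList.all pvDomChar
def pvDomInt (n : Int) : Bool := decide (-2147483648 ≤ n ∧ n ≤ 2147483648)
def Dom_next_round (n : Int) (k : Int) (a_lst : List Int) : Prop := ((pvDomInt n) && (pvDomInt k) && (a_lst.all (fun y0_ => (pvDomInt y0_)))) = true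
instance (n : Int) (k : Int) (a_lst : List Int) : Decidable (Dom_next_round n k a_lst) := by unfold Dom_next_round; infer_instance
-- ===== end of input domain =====

-- B computes the k-th place threshold once and counts scores ≥ it, instead of A's tie-walking while-loop; same return value on Pre_.

-- ===== PORT A =====
-- the 'while True' loop of A; next_k is the value BEFORE the 'next_k += 1' at the top of the body;
-- fuel only makes the recursion total (it never runs out on inputs admitted by Pre_)
def nextRoundLoopA (wnrs : List Int) (k : Int) (current_k : Int) : Nat → Int → Int
  | 0, _ => 0
  | fuel + 1, next_k =>
    let nk := next_k + 1
    if current_k + nk ≤ (wnrs.length : Int) - 1 ∧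
        PySem.List.pyGetD wnrs current_k 0 = PySem.List.pyGetD wnrs (current_k + nk) 0 then
      nextRoundLoopA wnrs k current_k fuel nk
    else
      ((PySem.List.slice wnrs none (some (k + nk - 1))).length : Int)

def next_round (n : Int) (k : Int) (a_lst : List Int) : Int :=
  let wnrs := PySem.List.sorted (a_lst.filter (fun i => decide (0 < i))) (fun x => x) true
  if wnrs.length = 0 then 0
  else if (wnrs.length : Int) ≤ k then (wnrs.length : Int)
  else nextRoundLoopA wnrs k (k - 1) (wnrs.length + 1) 0

-- ===== PORT B =====
def next_round_alt (n : Int) (k : Int) (a_lst : List Int) : Int :=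
  let scores := PySem.List.sorted (a_lst.filter (fun i => decide (0 < i))) (fun x => x) true
  if scores = [] ∨ (scores.length : Int) ≤ k then (scores.length : Int)
  else
    let threshold := PySem.List.pyGetD scores (k - 1) 0
    ((scores.countP (fun s => decide (threshold ≤ s))) : Int)

-- ===== PRECONDITION & SPEC =====
-- Pre_ restricts to the natural domain k ≥ 1 (or no positive scores at all, where A returns 0 for any k):
-- for k ≤ 0 with positive scores present, A's negative-index wraparound returns accidental values or raises IndexError.
def Pre_next_round (n : Int) (k : Int) (a_lst : List Int) : Prop :=
  1 ≤ k ∨ a_lst.filter (fun i => decide (0 < i)) = []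
instance (n : Int) (k : Int) (a_lst : List Int) : Decidable (Pre_next_round n k a_lst) := by
  unfold Pre_next_round; infer_instance

def pvWitness_next_round : Int × Int × List Int := (8, 5, [10, 9, 8, 7, 7, 7, 5, 5])

def Spec_next_round (n : Int) (k : Int) (a_lst : List Int) (out : Int) : Prop := out = next_round_alt n k a_lst
instance (n : Int) (k : Int) (a_lst : List Int) (out : Int) : Decidable (Spec_next_round n k a_lst out) := by unfold Spec_next_round; infer_instance

-- ===== CLAIM (what is proved, stated in full; the proofs are below) =====
def Claim_equal_next_round : Prop := ∀ (n : Int) (k : Int) (a_lst : List Int), Dom_next_round n k a_lst → Pre_next_round n k a_lst → Spec_next_round n k a_lst (next_round n k a_lst)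

-- ===== LEMMAS AND PROOFS =====

-- on a non-increasing list, the elements ≥ t are exactly the first countP-many positions
lemma countP_ge_prefix (t : Int) :
    ∀ (l : List Int), l.Pairwise (fun a b => b ≤ a) →
      ∀ i : Nat, (hi : i < l.length) →
        (t ≤ l[i] ↔ i < l.countP (fun s => decide (t ≤ s))) := by
  intro l
  induction l with
  | nil => intro _ i hi; simp at hi
  | cons a l ih =>
    intro hpw i hi
    have h1 : ∀ x ∈ l, x ≤ a := (List.pairwise_cons.mp hpw).1
    have hpl := (List.pairwise_cons.mp hpw).2
    by_cases hta : t ≤ a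
    · cases i with
      | zero => simp [List.countP_cons, hta]
      | succ j =>
        have hj : j < l.length := by simpa using hi
        have hiff := ih hpl j hj
        simp only [List.getElem_cons_succ]
        rw [hiff, List.countP_cons]
        simp [hta]
    · have hz : l.countP (fun s => decide (t ≤ s)) = 0 := by
        rw [List.countP_eq_zero]
        intro x hx
        have := h1 x hx
        simp only [decide_eq_true_eq]
        omega
      cases i with
      | zero => simp [List.countP_cons, hta, hz]
      | succ j =>
        have hj : j < l.length := by simpa using hi
        have hle : l[j] ≤ a := h1 _ (List.getElem_mem hj)
        simp only [List.getElem_cons_succ, List.countP_cons, hz, decide_eq_true_eq]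
        constructor
        · intro h; exact absurd (h.trans hle) hta
        · intro h; exact absurd h (by simp [hta])

-- the tie-walking loop of A returns the count of elements ≥ the k-th place score
lemma loopA_eq (w : List Int) (k : Int) (t : Int) (c : Nat)
    (hpw : w.Pairwise (fun a b => b ≤ a))
    (hk : 1 ≤ k) (hklt : k < (w.length : Int))
    (ht : t = PySem.List.pyGetD w (k - 1) 0)
    (hget : ∀ i : Nat, (hi : i < w.length) → (t ≤ w[i] ↔ i < c))
    (hc : c ≤ w.length) :
    ∀ (fuel : Nat) (m : Int), 0 ≤ m → k + m ≤ (c : Int) →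
      (c : Int) - k - m < (fuel : Int) →
      nextRoundLoopA w k (k - 1) fuel m = (c : Int) := by
  intro fuel
  induction fuel with
  | zero => intro m hm hinv hfuel; simp at hfuel; omega
  | succ f ihf =>
    intro m hm hinv hfuel
    have hkm0 : (0:Int) ≤ k + m := by omega
    have hk1 : PySem.List.pyGetD w (k - 1) 0 = w[(k-1).toNat] :=
      PySem.List.pyGetD_eq_getElem w (i := k - 1) 0 (by omega) (by omega)
    have hk1lt : (k-1).toNat < w.length := by omega
    have htw : w[(k-1).toNat] = t := (ht.trans hk1).symm
    have hkc : (k:Int) ≤ (c:Int) := by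
      have := (hget (k-1).toNat hk1lt).mp (le_of_eq htw.symm)
      omega
    unfold nextRoundLoopA
    simp only []
    by_cases hlt : k + m < (c : Int)
    · -- position k+m is still a tie: condition holds, continue
      have hposlt : (k + m).toNat < w.length := by omega
      have hbound : k - 1 + (m + 1) ≤ (w.length : Int) - 1 := by omega
      have hpos : PySem.List.pyGetD w (k - 1 + (m + 1)) 0 = w[(k+m).toNat] := by
        have harg : k - 1 + (m + 1) = k + m := by ring
        rw [harg]
        exact PySem.List.pyGetD_eq_getElem w (i := k + m) 0 (by omega) (by omega)
      have hget_pos : t ≤ w[(k+m).toNat] := by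
        rw [hget (k+m).toNat hposlt]; omega
      have hle_pos : w[(k+m).toNat] ≤ w[(k-1).toNat] :=
        (List.pairwise_iff_getElem.mp hpw) _ _ _ _ (by omega)
      rw [htw] at hle_pos
      have heqv : PySem.List.pyGetD w (k - 1) 0 = PySem.List.pyGetD w (k - 1 + (m + 1)) 0 := by
        rw [hk1, hpos, htw]
        exact le_antisymm hget_pos hle_pos
      rw [if_pos ⟨hbound, heqv⟩]
      exact ihf (m + 1) (by omega) (by omega) (by omega)
    · -- position k+m = c : the tie run ends here (either past the end, or a strictly smaller score)
      have hpos_eq : k + m = (c : Int) := by omega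
      have hcond : ¬ (k - 1 + (m + 1) ≤ (w.length : Int) - 1 ∧
          PySem.List.pyGetD w (k - 1) 0 = PySem.List.pyGetD w (k - 1 + (m + 1)) 0) := by
        rintro ⟨hb, he⟩
        have hposlt : (k + m).toNat < w.length := by omega
        have hpos : PySem.List.pyGetD w (k - 1 + (m + 1)) 0 = w[(k+m).toNat] := by
          have harg : k - 1 + (m + 1) = k + m := by ring
          rw [harg]
          exact PySem.List.pyGetD_eq_getElem w (i := k + m) 0 (by omega) (by omega)
        have hnot : ¬ t ≤ w[(k+m).toNat] := by
          rw [hget (k+m).toNat hposlt]; omega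
        rw [hk1, hpos] at he
        exact hnot (le_of_eq (htw.symm.trans he))
      rw [if_neg hcond]
      have harg : k + (m + 1) - 1 = ((c : Nat) : Int) := by omega
      rw [harg, PySem.List.slice_to_natCast]
      simp [List.length_take]
      omega

-- ===== VERDICT (by name: the statement is the Claim_ definition above) =====
theorem next_round_spec : Claim_equal_next_round := by
  intro n k a_lst _ hpre
  unfold Spec_next_round next_round next_round_alt
  set w := PySem.List.sorted (a_lst.filter (fun i => decide (0 < i))) (fun x => x) true with hw
  simp only []
  by_cases hnil : w = []
  · simp [hnil]
  · have hk : 1 ≤ k := by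
      rcases hpre with hk | hfe
      · exact hk
      · exfalso; apply hnil; rw [hw, hfe]; rfl
    have hlen0 : w.length ≠ 0 := fun h => hnil (List.length_eq_zero_iff.mp h)
    by_cases hle : (w.length : Int) ≤ k
    · simp [hlen0, hle, hnil]
    · rw [if_neg hlen0, if_neg hle, if_neg (by push_neg; exact ⟨hnil, by omega⟩)]
      have hpw : w.Pairwise (fun a b => b ≤ a) := by
        have := PySem.List.sorted_pairwise_rev (xs := a_lst.filter (fun i => decide (0 < i)))
          (key := fun x => x)
        exact this
      set t := PySem.List.pyGetD w (k - 1) 0 with htdef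
      set c := w.countP (fun s => decide (t ≤ s)) with hcdef
      have hget : ∀ i : Nat, (hi : i < w.length) → (t ≤ w[i] ↔ i < c) :=
        fun i hi => countP_ge_prefix t w hpw i hi
      exact loopA_eq w k t c hpw hk (by omega) htdef hget (List.countP_le_length)
        (w.length + 1) 0 le_rfl
        (by
          have hk1 : PySem.List.pyGetD w (k - 1) 0 = w[(k-1).toNat] :=
            PySem.List.pyGetD_eq_getElem w (i := k - 1) 0 (by omega) (by omega)
          have := (hget (k-1).toNat (by omega)).mp (by rw [htdef, hk1])
          omega)
        (by have := List.countP_le_length (l := w) (p := fun s => decide (t ≤ s)); omega)
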